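-- pv_equiv track=rewrite | github.com/mrazali/Network-Security-AES | AES_Encryption.py | bin_mul
-- ===== SOURCE A (Python) =====
-- def hot_bits(ary):
--     a = []
--     for i in range(0,len(ary)):
--         if ary[i]==1:
--             a.append(i+1)
--     return a
--
-- def bin_mul(ary2,ary1):
--     ary1.reverse()
--     ary2.reverse()
--     ary1 = hot_bits(ary1)
--     ary2 = hot_bits(ary2)
--     ary = []
--     bt = [0,0,0,0,0,0,0,0]
--     if 1 in ary1:
--         for i in ary2:
--             ary.append(i)
--     if 2 in ary1:
--         for i in ary2:
--             ary.append(i+1)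
--     if 9 in ary:
--         ary[len(ary)-1]=5
--         ary.append(4)
--         ary.append(2)
--         ary.append(1)
--     for i in range(0,len(ary)):
--         for j in range(i+1,len(ary)):
--             if ary[i]==ary[j]:
--                 ary[i]=ary[j]=0
--     for i in ary:
--         if i!=0:
--             bt[i-1]=1
--     bt.reverse()
--     return bt
-- ===== SOURCE B (Python) =====
-- def bin_mul(ary2, ary1):
--     # Same in-place reversal side effects as the original.
--     ary1.reverse()
--     ary2.reverse()
--     h2 = [i + 1 for i, v in enumerate(ary2) if v == 1]
--     vals = (h2 if len(ary1) >= 1 and ary1[0] == 1 else []) \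
--          + ([i + 1 for i in h2] if len(ary1) >= 2 and ary1[1] == 1 else [])
--     if 9 in vals:
--         vals[-1] = 5
--         vals += [4, 2, 1]
--     odd = set()
--     for v in vals:
--         if v in odd:
--             odd.remove(v)
--         else:
--             odd.add(v)
--     return [1 if (8 - i) in odd else 0 for i in range(8)]
-- ===== Notes on version B (the rewrite author's own statement) =====
-- stated objective: simpler
-- what changed: A's quadratic nested pair-cancel loop (zeroing equal pairs in place, then scanning for nonzero survivors) is replaced by a single pass maintaining a toggle set of values seen an odd number of times, and the index-loop hot_bits helper plus final bt.reverse() are replaced by comprehensions; B performs the same in-place reversals of both arguments.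
import Mathlib
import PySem

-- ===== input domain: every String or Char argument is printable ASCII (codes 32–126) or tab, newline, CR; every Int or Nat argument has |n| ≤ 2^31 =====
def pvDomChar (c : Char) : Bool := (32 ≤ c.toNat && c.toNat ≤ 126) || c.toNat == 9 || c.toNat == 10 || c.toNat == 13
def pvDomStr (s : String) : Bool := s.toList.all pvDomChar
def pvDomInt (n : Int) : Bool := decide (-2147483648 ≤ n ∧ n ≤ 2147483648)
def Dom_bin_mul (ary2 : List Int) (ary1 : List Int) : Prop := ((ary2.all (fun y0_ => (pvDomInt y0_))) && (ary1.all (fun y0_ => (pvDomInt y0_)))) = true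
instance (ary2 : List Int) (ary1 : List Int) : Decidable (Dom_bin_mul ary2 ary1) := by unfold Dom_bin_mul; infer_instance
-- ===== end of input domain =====

-- B replaces A's O(k^2) nested pair-cancel loop by a one-pass set toggle (odd-occurrence set);
-- both A and B reverse their two list arguments in place in Python (same side effect), so the
-- equivalence proved here covers the return value; the in-place reversals are identical by construction.

-- ===== PORT A =====
-- hot_bits: for i in range(0,len(ary)): if ary[i]==1: a.append(i+1)
-- (i ranges over valid indices 0..len-1, so List.range/getD are exact for range(0,len(ary))/ary[i])
def hotBitsA (ary : List Int) : List Int :=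
  (List.range ary.length).foldl (fun a i => if ary.getD i 0 == 1 then a ++ [(i : Int) + 1] else a) []

-- the nested pair-cancel loop of A; len(ary) is constant during the loop (set keeps the length)
def pairClearA (ary : List Int) : List Int :=
  (List.range ary.length).foldl (fun a i =>
    (List.range' (i + 1) (ary.length - (i + 1))).foldl (fun a j =>
      if a.getD i 0 == a.getD j 0 then (a.set i 0).set j 0 else a) a) ary

-- everything after `ary1 = hot_bits(ary1); ary2 = hot_bits(ary2)`, with the two membership
-- tests `1 in ary1` / `2 in ary1` passed in as booleans (h2 is A's rebound `ary2`)
def restA (h2 : List Int) (b1 b2 : Bool) : List Int :=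
  let ary : List Int := []
  let ary := if b1 then h2.foldl (fun a i => a ++ [i]) ary else ary
  let ary := if b2 then h2.foldl (fun a i => a ++ [i + 1]) ary else ary
  let ary := if (9 : Int) ∈ ary then
      (((PySem.List.pySetD ary ((ary.length : Int) - 1) 5) ++ [4]) ++ [2]) ++ [1]
    else ary
  let ary := pairClearA ary
  let bt := ary.foldl (fun bt i => if i ≠ 0 then PySem.List.pySetD bt (i - 1) 1 else bt)
      ([0, 0, 0, 0, 0, 0, 0, 0] : List Int)
  bt.reverse

def bin_mul (ary2 : List Int) (ary1 : List Int) : List Int :=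
  let a1 := ary1.reverse
  let a2 := ary2.reverse
  let h1 := hotBitsA a1
  let h2 := hotBitsA a2
  restA h2 (decide ((1 : Int) ∈ h1)) (decide ((2 : Int) ∈ h1))

-- ===== PORT B =====
-- everything after the hot-bit comprehension, with the two guard booleans passed in
def restB (h2 : List Int) (b1 b2 : Bool) : List Int :=
  let vals := (if b1 then h2 else []) ++ (if b2 then h2.map (fun i => i + 1) else [])
  let vals := if (9 : Int) ∈ vals then (PySem.List.pySetD vals (-1) 5) ++ [4, 2, 1] else vals
  -- set toggle: odd.remove(v) is guarded by `v in odd`, so remove? is `some`; getD makes it total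
  let odd := vals.foldl
      (fun s v => if v ∈ s then (PySem.Set.remove? s v).getD s else PySem.Set.add s v)
      ([] : PySem.Set Int)
  (List.range 8).map (fun i => if ((8 : Int) - (i : Int)) ∈ odd then (1 : Int) else 0)

def bin_mul_alt (ary2 : List Int) (ary1 : List Int) : List Int :=
  let a1 := ary1.reverse
  let a2 := ary2.reverse
  let h2 := ((PySem.List.enumerate a2).filter (fun p => p.2 == 1)).map (fun p => p.1 + 1)
  restB h2 (decide (1 ≤ a1.length ∧ a1.getD 0 0 = 1)) (decide (2 ≤ a1.length ∧ a1.getD 1 0 = 1))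

-- ===== PRECONDITION & SPEC =====
-- Pre_ restricts the multiplicand ary2 to hot bits within the top 9 (resp. 8 when the second
-- guard fires) bit positions — the 8-bit GF(2^8) domain the function is written for; outside it
-- A's bt[i-1] assignment raises IndexError except for rare accidental pair-cancellations
-- (on those excluded returning inputs A and B agree anyway; see cites).
def Pre_bin_mul (ary2 : List Int) (ary1 : List Int) : Prop :=
  (ary1.reverse[0]? = some 1 → ∀ j < ary2.length, ary2.reverse[j]? = some 1 → j < 9) ∧
  (ary1.reverse[1]? = some 1 → ∀ j < ary2.length, ary2.reverse[j]? = some 1 → j < 8)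
instance (ary2 : List Int) (ary1 : List Int) : Decidable (Pre_bin_mul ary2 ary1) := by
  unfold Pre_bin_mul; infer_instance

def pvWitness_bin_mul : List Int × List Int := ([1, 0, 1], [0, 1, 1])

def Spec_bin_mul (ary2 : List Int) (ary1 : List Int) (out : List Int) : Prop := out = bin_mul_alt ary2 ary1
instance (ary2 : List Int) (ary1 : List Int) (out : List Int) : Decidable (Spec_bin_mul ary2 ary1 out) := by unfold Spec_bin_mul; infer_instance

-- ===== CLAIM (what is proved, stated in full; the proofs are below) =====
def Claim_equal_bin_mul : Prop := ∀ (ary2 : List Int) (ary1 : List Int), Dom_bin_mul ary2 ary1 → Pre_bin_mul ary2 ary1 → Spec_bin_mul ary2 ary1 (bin_mul ary2 ary1)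

-- ===== LEMMAS AND PROOFS =====

def hotSpec (l : List Int) : List Int :=
  ((List.range l.length).filter (fun i => l.getD i 0 == 1)).map (fun (i : Nat) => (i : Int) + 1)

theorem hotB_eq (l : List Int) :
    ((PySem.List.enumerate l).filter (fun p => p.2 == 1)).map (fun p => p.1 + 1) = hotSpec l := by
  rw [PySem.List.enumerate_eq_map_pyRange l 0]
  rw [List.filter_map, List.map_map]
  unfold hotSpec
  rw [show PySem.List.len l = ((l.length : Nat) : Int) from rfl, PySem.List.pyRange_zero_nat]
  rw [List.filter_map, List.map_map]
  simp [Function.comp_def]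

theorem mem_hotSpec {l : List Int} {v : Int} :
    v ∈ hotSpec l ↔ ∃ i : Nat, i < l.length ∧ l[i]? = some 1 ∧ v = (i : Int) + 1 := by
  unfold hotSpec
  simp only [List.mem_map, List.mem_filter, List.mem_range, beq_iff_eq]
  constructor
  · rintro ⟨i, ⟨hi, hv⟩, rfl⟩
    exact ⟨i, hi, by rw [List.getElem?_eq_getElem hi]; rw [List.getD_eq_getElem?_getD, List.getElem?_eq_getElem hi] at hv; simp_all, rfl⟩
  · rintro ⟨i, hi, hv, rfl⟩
    exact ⟨i, ⟨hi, by rw [List.getD_eq_getElem?_getD, hv]; rfl⟩, rfl⟩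

theorem pairwise_hotSpec (l : List Int) : (hotSpec l).Pairwise (· < ·) := by
  unfold hotSpec
  refine List.Pairwise.map _ ?_ (List.Pairwise.filter _ List.pairwise_lt_range)
  intro a b h
  show (a : Int) + 1 < (b : Int) + 1
  omega

theorem getD_iff_getElem?_one (l : List Int) (k : Nat) :
    (k + 1 ≤ l.length ∧ l.getD k 0 = 1) ↔ l[k]? = some 1 := by
  constructor
  · rintro ⟨h1, h2⟩
    have hk : k < l.length := by omega
    rw [List.getD_eq_getElem?_getD, List.getElem?_eq_getElem hk] at h2
    rw [List.getElem?_eq_getElem hk]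
    simpa using h2
  · intro h
    have hk : k < l.length := by
      by_contra hk
      rw [List.getElem?_eq_none_iff.2 (by omega)] at h
      cases h
    rw [List.getElem?_eq_getElem hk] at h
    refine ⟨by omega, ?_⟩
    rw [List.getD_eq_getElem?_getD, List.getElem?_eq_getElem hk]
    simpa using h

theorem one_mem_hotSpec (l : List Int) :
    ((1 : Int) ∈ hotSpec l) ↔ (1 ≤ l.length ∧ l.getD 0 0 = 1) := by
  rw [mem_hotSpec, getD_iff_getElem?_one l 0]
  constructor
  · rintro ⟨i, hi, hv, he⟩
    have : i = 0 := by omega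
    subst this; simpa using hv
  · intro h; exact ⟨0, by
      have : 0 < l.length := by
        by_contra hk
        rw [List.getElem?_eq_none_iff.2 (by omega)] at h
        cases h
      exact ⟨this, h, rfl⟩⟩

theorem two_mem_hotSpec (l : List Int) :
    ((2 : Int) ∈ hotSpec l) ↔ (2 ≤ l.length ∧ l.getD 1 0 = 1) := by
  rw [mem_hotSpec, getD_iff_getElem?_one l 1]
  constructor
  · rintro ⟨i, hi, hv, he⟩
    have : i = 1 := by omega
    subst this; simpa using hv
  · intro h; exact ⟨1, by
      have : 1 < l.length := by
        by_contra hk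
        rw [List.getElem?_eq_none_iff.2 (by omega)] at h
        cases h
      exact ⟨this, h, rfl⟩⟩

theorem sorted_subset_sublist : ∀ (l H : List Int), H.Pairwise (· < ·) → l.Pairwise (· < ·) →
    (∀ x ∈ H, x ∈ l) → H.Sublist l := by
  intro l
  induction l with
  | nil =>
    intro H _ _ hs
    cases H with
    | nil => exact List.Sublist.refl _
    | cons h t => exact absurd (hs h (by simp)) (by simp)
  | cons x l ih =>
    intro H hH hl hs
    cases H with
    | nil => exact List.nil_sublist _
    | cons h t =>
      rcases List.pairwise_cons.1 hH with ⟨hht, ht⟩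
      rcases List.pairwise_cons.1 hl with ⟨hxl, hl'⟩
      by_cases hx : h = x
      · subst hx
        refine List.Sublist.cons₂ _ (ih t ht hl' ?_)
        intro y hy
        have hyl : y ∈ h :: l := hs y (List.mem_cons_of_mem _ hy)
        rcases List.mem_cons.1 hyl with rfl | h2
        · exact absurd (hht y hy) (lt_irrefl y)
        · exact h2
      · have hmem : h ∈ l := by
          rcases List.mem_cons.1 (hs h (by simp)) with rfl | h2
          · exact absurd rfl hx
          · exact h2
        refine List.Sublist.cons _ (ih (h :: t) hH hl' ?_)
        intro y hy
        rcases List.mem_cons.1 hy with rfl | hyt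
        · exact hmem
        · have hxy : x < y := lt_trans (hxl h hmem) (hht y hyt)
          rcases List.mem_cons.1 (hs y hy) with rfl | h2
          · exact absurd hxy (lt_irrefl y)
          · exact h2

theorem hotBitsA_eq (l : List Int) : hotBitsA l = hotSpec l := by
  unfold hotBitsA hotSpec
  simpa using PySem.List.foldl_append_if (fun i => l.getD i 0 == 1)
    (fun (i : Nat) => (i : Int) + 1) (List.range l.length) []

theorem rest_false_false (H H' : List Int) : restA H false false = restB H' false false := by
  simp [restA, restB, pairClearA]

theorem mem_one_to_nine {v : Int} (h1 : 1 ≤ v) (h2 : v ≤ 9) :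
    v ∈ ([1, 2, 3, 4, 5, 6, 7, 8, 9] : List Int) := by
  simp only [List.mem_cons, List.not_mem_nil, or_false]
  omega

theorem hotSpec_bound {a2 : List Int} {m : Nat}
    (hok : ∀ j < a2.length, a2[j]? = some 1 → j < m) :
    ∀ v ∈ hotSpec a2, 1 ≤ v ∧ v ≤ (m : Int) := by
  intro v hv
  rcases mem_hotSpec.1 hv with ⟨i, hi, hv1, rfl⟩
  have := hok i hi hv1
  omega

theorem hotSpec_sublist {a2 : List Int} {m : Nat} (hm : m ≤ 9)
    (hok : ∀ j < a2.length, a2[j]? = some 1 → j < m) :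
    (hotSpec a2).Sublist ([1, 2, 3, 4, 5, 6, 7, 8, 9] : List Int) := by
  refine sorted_subset_sublist _ _ (pairwise_hotSpec a2) (by decide) ?_
  intro v hv
  rcases hotSpec_bound hok v hv with ⟨h1, h2⟩
  exact mem_one_to_nine h1 (by omega)

set_option maxRecDepth 100000 in
set_option maxHeartbeats 4000000 in
theorem core : ∀ H ∈ ([1, 2, 3, 4, 5, 6, 7, 8, 9] : List Int).sublists, ∀ b1 b2 : Bool,
    (b2 = true → (9 : Int) ∉ H) → restA H b1 b2 = restB H b1 b2 := by
  decide

-- ===== VERDICT (by name: the statement is the Claim_ definition above) =====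
theorem bin_mul_spec : Claim_equal_bin_mul := by
  intro ary2 ary1 _ hpre
  unfold Spec_bin_mul
  simp only [bin_mul, bin_mul_alt, hotBitsA_eq, hotB_eq]
  rw [show (decide ((1 : Int) ∈ hotSpec ary1.reverse))
        = decide (1 ≤ ary1.reverse.length ∧ ary1.reverse.getD 0 0 = 1)
      from decide_eq_decide.2 (one_mem_hotSpec ary1.reverse),
      show (decide ((2 : Int) ∈ hotSpec ary1.reverse))
        = decide (2 ≤ ary1.reverse.length ∧ ary1.reverse.getD 1 0 = 1)
      from decide_eq_decide.2 (two_mem_hotSpec ary1.reverse)]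
  have hlen : ary2.reverse.length = ary2.length := List.length_reverse
  by_cases h2 : 2 ≤ ary1.reverse.length ∧ ary1.reverse.getD 1 0 = 1
  · -- second guard fires: Pre_ bounds the hot bits by 8, so 9 is not among them
    have hok : ∀ j < ary2.length, ary2.reverse[j]? = some 1 → j < 8 :=
      hpre.2 ((getD_iff_getElem?_one ary1.reverse 1).1 h2)
    have hok' : ∀ j < ary2.reverse.length, ary2.reverse[j]? = some 1 → j < 8 := by
      rw [hlen]; exact hok
    have hsub := hotSpec_sublist (by omega) hok'
    have h9 : (9 : Int) ∉ hotSpec ary2.reverse := by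
      intro h
      have := (hotSpec_bound hok' 9 h).2
      omega
    rw [decide_eq_true h2]
    exact core _ (List.mem_sublists.2 hsub) _ true (fun _ => h9)
  · rw [decide_eq_false h2]
    by_cases h1 : 1 ≤ ary1.reverse.length ∧ ary1.reverse.getD 0 0 = 1
    · -- only the first guard fires: Pre_ bounds the hot bits by 9
      have hok : ∀ j < ary2.length, ary2.reverse[j]? = some 1 → j < 9 :=
        hpre.1 ((getD_iff_getElem?_one ary1.reverse 0).1 h1)
      have hok' : ∀ j < ary2.reverse.length, ary2.reverse[j]? = some 1 → j < 9 := by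
        rw [hlen]; exact hok
      have hsub := hotSpec_sublist (by omega) hok'
      rw [decide_eq_true h1]
      exact core _ (List.mem_sublists.2 hsub) _ false (by simp)
    · -- neither guard fires: both programs build the empty list and return eight zeros
      rw [decide_eq_false h1]
      exact rest_false_false _ _
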